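-- pv_equiv track=rewrite | github.com/sanchopanda/polymarket | scripts/backtest_binance_signal.py | find_tick_at
-- ===== SOURCE A (Python) =====
-- def find_tick_at(ticks_list, target_ste, tolerance=5):
--     """Find tick closest to target seconds_to_expiry within tolerance."""
--     best = None
--     best_diff = float("inf")
--     for t in ticks_list:
--         diff = abs(t["ste"] - target_ste)
--         if diff < best_diff and diff <= tolerance:
--             best = t
--             best_diff = diff
--     return best
-- ===== SOURCE B (Python) =====
-- def find_tick_at(ticks_list, target_ste, tolerance=5):
--     """Find tick closest to target seconds_to_expiry within tolerance."""
--     ranked = sorted(ticks_list, key=lambda t: abs(t["ste"] - target_ste))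
--     if ranked and abs(ranked[0]["ste"] - target_ste) <= tolerance:
--         return ranked[0]
--     return None
-- ===== Notes on version B (the rewrite author's own statement) =====
-- stated objective: alternative
-- what changed: Replaced A's single-pass best/best_diff tracking loop by sorting all ticks by distance to the target (stable sort keeps the first-encountered tie winner first) and returning the head if it is within tolerance.
import Mathlib
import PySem

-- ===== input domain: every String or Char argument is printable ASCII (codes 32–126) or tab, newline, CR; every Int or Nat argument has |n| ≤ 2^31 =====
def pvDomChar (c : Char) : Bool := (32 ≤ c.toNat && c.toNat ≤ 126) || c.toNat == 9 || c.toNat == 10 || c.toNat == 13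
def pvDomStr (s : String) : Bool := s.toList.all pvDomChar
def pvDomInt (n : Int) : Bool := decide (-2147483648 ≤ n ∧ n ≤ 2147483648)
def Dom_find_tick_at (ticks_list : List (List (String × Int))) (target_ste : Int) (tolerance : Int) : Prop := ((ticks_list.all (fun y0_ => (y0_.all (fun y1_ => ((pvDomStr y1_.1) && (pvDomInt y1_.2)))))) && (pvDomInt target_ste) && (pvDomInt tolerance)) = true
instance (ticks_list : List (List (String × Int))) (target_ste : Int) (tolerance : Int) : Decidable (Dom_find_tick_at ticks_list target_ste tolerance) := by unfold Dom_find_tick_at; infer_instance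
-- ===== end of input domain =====

-- B replaces A's single-pass best/best_diff tracking loop by sorting the ticks by
-- distance to the target (stable) and returning the head if within tolerance
-- (objective: alternative algorithm of similar size; not faster).


-- ===== PORT A =====
-- t["ste"] is a dict lookup: first match in the association list (KeyError excluded by Pre_,
-- so the .getD 0 default is never reached on admitted inputs); best_diff = float("inf") is
-- modelled as none (every diff is < it). The loop body is named stepA for the proofs.
def stepA (target_ste tolerance : Int)
    (st : Option (List (String × Int)) × Option Int) (t : List (String × Int)) :
    Option (List (String × Int)) × Option Int :=
  let diff : Int := |(List.lookup "ste" t).getD 0 - target_ste|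
  if (st.2.all (fun d => decide (diff < d))) && decide (diff ≤ tolerance) then
    (some t, some diff)
  else st

def find_tick_at (ticks_list : List (List (String × Int))) (target_ste : Int) (tolerance : Int) : Option (List (String × Int)) :=
  (ticks_list.foldl (stepA target_ste tolerance) (none, none)).1

-- ===== PORT B =====
-- ranked = sorted(ticks_list, key=...); return ranked[0] if it exists and is within
-- tolerance, else None.
def find_tick_at_alt (ticks_list : List (List (String × Int))) (target_ste : Int) (tolerance : Int) : Option (List (String × Int)) :=
  let ranked := PySem.List.sorted ticks_list (fun t => |(List.lookup "ste" t).getD 0 - target_ste|) false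
  match ranked with
  | [] => none
  | m :: _ => if |(List.lookup "ste" m).getD 0 - target_ste| ≤ tolerance then some m else none

-- ===== PRECONDITION & SPEC =====
-- Pre_: every tick contains the key "ste" — on a tick without it Python's t["ste"] raises KeyError (in A and in B alike).
def Pre_find_tick_at (ticks_list : List (List (String × Int))) (target_ste : Int) (tolerance : Int) : Prop :=
  ticks_list.all (fun t => t.any (fun p => p.1 == "ste")) = true
instance (ticks_list : List (List (String × Int))) (target_ste : Int) (tolerance : Int) : Decidable (Pre_find_tick_at ticks_list target_ste tolerance) := by unfold Pre_find_tick_at; infer_instance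
def pvWitness_find_tick_at : (List (List (String × Int))) × Int × Int := ([[("ste", 3)], [("ste", 7)]], 5, 5)

def Spec_find_tick_at (ticks_list : List (List (String × Int))) (target_ste : Int) (tolerance : Int) (out : Option (List (String × Int))) : Prop := out = find_tick_at_alt ticks_list target_ste tolerance
instance (ticks_list : List (List (String × Int))) (target_ste : Int) (tolerance : Int) (out : Option (List (String × Int))) : Decidable (Spec_find_tick_at ticks_list target_ste tolerance out) := by unfold Spec_find_tick_at; infer_instance

-- ===== CLAIM (what is proved, stated in full; the proofs are below) =====
def Claim_equal_find_tick_at : Prop := ∀ (ticks_list : List (List (String × Int))) (target_ste : Int) (tolerance : Int), Dom_find_tick_at ticks_list target_ste tolerance → Pre_find_tick_at ticks_list target_ste tolerance → Spec_find_tick_at ticks_list target_ste tolerance (find_tick_at ticks_list target_ste tolerance)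

-- ===== LEMMAS AND PROOFS =====

-- A's step once the snd component is known to be the key of the fst (the invariant
-- of A's loop): a pure first-strict-minimum update restricted to in-tolerance ticks.
def stepB (target_ste tolerance : Int)
    (acc : Option (List (String × Int))) (t : List (String × Int)) :
    Option (List (String × Int)) :=
  if decide (|(List.lookup "ste" t).getD 0 - target_ste| ≤ tolerance) then
    (match acc with
     | none => some t
     | some m =>
       if |(List.lookup "ste" t).getD 0 - target_ste| < |(List.lookup "ste" m).getD 0 - target_ste| then some t
       else some m)
  else acc

-- first-strict-minimum update with no tolerance restriction
def fminStep {α : Type} (k : α → Int) (acc : Option α) (x : α) : Option α :=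
  match acc with
  | none => some x
  | some m => if k x < k m then some x else some m

-- keep the running minimum only if it is within tolerance
def filtTol {α : Type} (k : α → Int) (tol : Int) (b : Option α) : Option α :=
  match b with
  | none => none
  | some m => if k m ≤ tol then some m else none

theorem stepA_eq_stepB (target_ste tolerance : Int)
    (b : Option (List (String × Int))) (t : List (String × Int)) :
    stepA target_ste tolerance (b, b.map (fun m => |(List.lookup "ste" m).getD 0 - target_ste|)) t
      = (stepB target_ste tolerance b t,
         (stepB target_ste tolerance b t).map (fun m => |(List.lookup "ste" m).getD 0 - target_ste|)) := by
  cases b with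
  | none =>
    by_cases h : |(List.lookup "ste" t).getD 0 - target_ste| ≤ tolerance <;>
      simp [stepA, stepB, h]
  | some m =>
    by_cases h : |(List.lookup "ste" t).getD 0 - target_ste| ≤ tolerance <;>
      by_cases h2 : |(List.lookup "ste" t).getD 0 - target_ste| < |(List.lookup "ste" m).getD 0 - target_ste| <;>
        simp [stepA, stepB, h, h2]

theorem find_tick_at_loop (target_ste tolerance : Int)
    (l : List (List (String × Int))) (b : Option (List (String × Int))) :
    (l.foldl (stepA target_ste tolerance)
      (b, b.map (fun m => |(List.lookup "ste" m).getD 0 - target_ste|))).1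
    = l.foldl (stepB target_ste tolerance) b := by
  induction l generalizing b with
  | nil => rfl
  | cons t l ih =>
    rw [List.foldl_cons, List.foldl_cons, stepA_eq_stepB]
    exact ih _

-- B's step with the tolerance restriction is the unrestricted first-minimum step
-- seen through filtTol (downward-closedness of key ≤ tol is what makes this true).
theorem stepB_eq_filt (target_ste tolerance : Int)
    (b : Option (List (String × Int))) (t : List (String × Int)) :
    stepB target_ste tolerance
      (filtTol (fun m => |(List.lookup "ste" m).getD 0 - target_ste|) tolerance b) t
    = filtTol (fun m => |(List.lookup "ste" m).getD 0 - target_ste|) tolerance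
        (fminStep (fun m => |(List.lookup "ste" m).getD 0 - target_ste|) b t) := by
  cases b with
  | none =>
    by_cases h : |(List.lookup "ste" t).getD 0 - target_ste| ≤ tolerance <;>
      simp [stepB, fminStep, filtTol, h]
  | some m =>
    by_cases hm : |(List.lookup "ste" m).getD 0 - target_ste| ≤ tolerance <;>
      by_cases h : |(List.lookup "ste" t).getD 0 - target_ste| ≤ tolerance <;>
        by_cases h2 : |(List.lookup "ste" t).getD 0 - target_ste| < |(List.lookup "ste" m).getD 0 - target_ste| <;>
          simp [stepB, fminStep, filtTol, h, hm, h2] <;> omega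

theorem foldl_stepB_filt (target_ste tolerance : Int)
    (l : List (List (String × Int))) (b : Option (List (String × Int))) :
    l.foldl (stepB target_ste tolerance)
      (filtTol (fun m => |(List.lookup "ste" m).getD 0 - target_ste|) tolerance b)
    = filtTol (fun m => |(List.lookup "ste" m).getD 0 - target_ste|) tolerance
        (l.foldl (fminStep (fun m => |(List.lookup "ste" m).getD 0 - target_ste|)) b) := by
  induction l generalizing b with
  | nil => rfl
  | cons t l ih =>
    rw [List.foldl_cons, List.foldl_cons, stepB_eq_filt]
    exact ih _

-- head of insertBy with a strict-< "before" test
theorem head?_insertBy {α : Type} (k : α → Int) (x : α) (ys : List α) :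
    (PySem.List.insertBy (fun a b => decide (k a < k b)) x ys).head?
      = some (match ys with
              | [] => x
              | y :: _ => if k x < k y then x else y) := by
  cases ys with
  | nil => simp [PySem.List.insertBy]
  | cons y t =>
    by_cases h : k x < k y <;> simp [PySem.List.insertBy, h]

-- head of the stable sort = the first strict-minimum fold
theorem head?_sorted {α : Type} (k : α → Int) (l : List α) :
    (PySem.List.sorted l k false).head? = l.foldl (fminStep k) none := by
  induction l using List.reverseRecOn with
  | nil => rfl
  | append_singleton l x ih =>
    rw [PySem.List.sorted_eq_foldl_insertBy] at *
    rw [List.foldl_append, List.foldl_append, List.foldl_cons, List.foldl_nil,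
        List.foldl_cons, List.foldl_nil, head?_insertBy]
    cases hs : l.foldl (fun acc x => PySem.List.insertBy (fun a b => decide (k a < k b)) x acc) [] with
    | nil => rw [hs] at ih; simp at ih; rw [← ih]; rfl
    | cons y t =>
      rw [hs] at ih; simp at ih; rw [← ih]
      by_cases h : k x < k y <;> simp [fminStep, h]

-- ===== VERDICT (by name: the statement is the Claim_ definition above) =====
theorem find_tick_at_spec : Claim_equal_find_tick_at := by
  intro ticks_list target_ste tolerance _ _
  unfold Spec_find_tick_at find_tick_at find_tick_at_alt
  have h0 := find_tick_at_loop target_ste tolerance ticks_list none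
  simp only [Option.map_none] at h0
  rw [h0]
  have h1 := foldl_stepB_filt target_ste tolerance ticks_list none
  simp only [filtTol] at h1
  rw [h1, ← head?_sorted]
  cases PySem.List.sorted ticks_list (fun t => |(List.lookup "ste" t).getD 0 - target_ste|) false with
  | nil => rfl
  | cons m t =>
    by_cases h : |(List.lookup "ste" m).getD 0 - target_ste| ≤ tolerance <;> simp [h]
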